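-- pv_equiv track=rewrite | github.com/cajigaslab/Thalamus | .venv/lib/python3.12/site-packages/nitypes/waveform/_digital/_port.py | _mask_to_column_indices
-- ===== SOURCE A (Python) =====
-- from typing import Literal
--
-- def _mask_to_column_indices(
--     mask: int, port_size: int, bitorder: Literal["big", "little"], /
-- ) -> list[int]:
--     """Return the column indices for the given mask.
--
--     >>> _mask_to_column_indices(0xF, 8, "big")
--     [4, 5, 6, 7]
--     >>> _mask_to_column_indices(0x100, 16, "big")
--     [7]
--     >>> _mask_to_column_indices(0xDEADBEEF, 32, "big")
--     [0, 1, 3, 4, 5, 6, 8, 10, 12, 13, 15, 16, 18, 19, 20, 21, 22, 24, 25, 26, 28, 29, 30, 31]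
--     >>> _mask_to_column_indices(0xF, 8, "little")
--     [0, 1, 2, 3]
--     >>> _mask_to_column_indices(0x100, 16, "little")
--     [8]
--     >>> _mask_to_column_indices(0xDEADBEEF, 32, "little")
--     [0, 1, 2, 3, 5, 6, 7, 9, 10, 11, 12, 13, 15, 16, 18, 19, 21, 23, 25, 26, 27, 28, 30, 31]
--     >>> _mask_to_column_indices(-1, 8)
--     Traceback (most recent call last):
--     ...
--     ValueError: The mask must be a non-negative integer.
--     <BLANKLINE>
--     Mask: -1
--     """
--     if mask < 0:
--         raise ValueError("The mask must be a non-negative integer.\n\n" f"Mask: {mask}")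
--     column_indices = []
--     bit_position = 0
--     while mask != 0:
--         if mask & 1:
--             if bitorder == "big":
--                 column_indices.append(port_size - 1 - bit_position)
--             else:  # little
--                 column_indices.append(bit_position)
--         bit_position += 1
--         mask >>= 1
--
--     if bitorder == "big":
--         column_indices.reverse()
--
--     return column_indices
-- ===== SOURCE B (Python) =====
-- def _mask_to_column_indices(mask, port_size, bitorder, /):
--     if mask < 0:
--         raise ValueError("The mask must be a non-negative integer.\n\n" f"Mask: {mask}")
--
--     def positions(m, width):
--         # ascending bit positions of m, assuming m < 2**width
--         if m == 0:
--             return []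
--         if width == 1:
--             return [0]
--         k = width // 2
--         return positions(m % (1 << k), k) + [k + p for p in positions(m >> k, width - k)]
--
--     little = positions(mask, max(mask.bit_length(), 1))
--     if bitorder == "big":
--         return [port_size - 1 - p for p in reversed(little)]
--     return little
-- ===== Notes on version B (the rewrite author's own statement) =====
-- stated objective: alternative
-- what changed: B enumerates set-bit positions by divide-and-conquer (split the bit range in half, recurse on the low and high halves, merge with an offset) instead of A's linear LSB-first shift-and-test loop with an accumulator and final reverse.
import Mathlib
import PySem

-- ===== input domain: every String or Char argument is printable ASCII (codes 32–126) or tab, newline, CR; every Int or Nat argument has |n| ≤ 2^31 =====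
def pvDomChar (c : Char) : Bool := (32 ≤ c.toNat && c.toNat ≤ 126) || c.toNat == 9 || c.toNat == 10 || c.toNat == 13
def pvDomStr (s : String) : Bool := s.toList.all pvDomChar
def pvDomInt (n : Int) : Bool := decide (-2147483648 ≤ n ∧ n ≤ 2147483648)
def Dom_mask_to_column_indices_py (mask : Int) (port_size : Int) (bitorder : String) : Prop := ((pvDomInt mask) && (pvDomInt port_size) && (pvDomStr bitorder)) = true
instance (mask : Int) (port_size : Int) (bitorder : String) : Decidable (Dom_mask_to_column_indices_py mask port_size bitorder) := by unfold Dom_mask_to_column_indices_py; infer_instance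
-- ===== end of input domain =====

-- B enumerates set-bit positions by divide-and-conquer on the bit range (split in half, recurse on the
-- low and high parts, merge with an offset) instead of A's linear LSB-first shift-and-test loop.
-- A raises ValueError for mask < 0; Pre_ excludes exactly those inputs.

-- ===== PORT A =====
-- A's while loop: state (mask, bit_position, column_indices); mask & 1 → m % 2, mask >>= 1 → m / 2.
-- The fuel argument (set to the initial mask, ≥ the number of halvings) only makes the loop total.
def pvLoopA (ps : Int) (bo : String) : Nat → Nat → Int → List Int → List Int
  | _, 0, _, acc => acc
  | 0, _, _, acc => acc
  | fuel + 1, m, bit, acc =>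
    pvLoopA ps bo fuel (m / 2) (bit + 1)
      (if m % 2 = 1 then acc ++ [if bo = "big" then ps - 1 - bit else bit] else acc)

def mask_to_column_indices_py (mask : Int) (port_size : Int) (bitorder : String) : List Int :=
  let column_indices := pvLoopA port_size bitorder mask.toNat mask.toNat 0 []
  if bitorder = "big" then column_indices.reverse else column_indices

-- ===== PORT B =====
-- Source B's mask.bit_length(), with a fuel argument (set to m) for totality.
def pvBitLen : Nat → Nat → Nat
  | _, 0 => 0
  | 0, _ => 0
  | fuel + 1, m => pvBitLen fuel (m / 2) + 1

-- Source B's `positions(m, width)`: ascending bit positions of m (< 2^width), by splitting the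
-- bit range at k = width // 2 and recursing on the low (m % 2^k) and high (m >> k) parts.
-- The fuel argument (set to the initial width, ≥ every sub-width) only makes the recursion total.
def pvPositions : Nat → Nat → Nat → List Int
  | _, 0, _ => []
  | 0, _, _ => []
  | fuel + 1, m, w =>
    if m = 0 then []
    else if w ≤ 1 then [0]
    else
      pvPositions fuel (m % 2 ^ (w / 2)) (w / 2) ++
        (pvPositions fuel (m / 2 ^ (w / 2)) (w - w / 2)).map
          (fun p => ((w / 2 : Nat) : Int) + p)

def mask_to_column_indices_py_alt (mask : Int) (port_size : Int) (bitorder : String) : List Int :=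
  let w := max (pvBitLen mask.toNat mask.toNat) 1
  let little := pvPositions w mask.toNat w
  if bitorder = "big" then little.reverse.map (fun p => port_size - 1 - p) else little

-- ===== PRECONDITION & SPEC =====
-- A raises ValueError on mask < 0; exactly those inputs are excluded.
def Pre_mask_to_column_indices_py (mask : Int) (port_size : Int) (bitorder : String) : Prop := 0 ≤ mask
instance (mask : Int) (port_size : Int) (bitorder : String) : Decidable (Pre_mask_to_column_indices_py mask port_size bitorder) := by unfold Pre_mask_to_column_indices_py; infer_instance
def pvWitness_mask_to_column_indices_py : Int × Int × String := (15, 8, "big")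

def Spec_mask_to_column_indices_py (mask : Int) (port_size : Int) (bitorder : String) (out : List Int) : Prop := out = mask_to_column_indices_py_alt mask port_size bitorder
instance (mask : Int) (port_size : Int) (bitorder : String) (out : List Int) : Decidable (Spec_mask_to_column_indices_py mask port_size bitorder out) := by unfold Spec_mask_to_column_indices_py; infer_instance

-- ===== CLAIM (what is proved, stated in full; the proofs are below) =====
def Claim_equal_mask_to_column_indices_py : Prop := ∀ (mask : Int) (port_size : Int) (bitorder : String), Dom_mask_to_column_indices_py mask port_size bitorder → Pre_mask_to_column_indices_py mask port_size bitorder → Spec_mask_to_column_indices_py mask port_size bitorder (mask_to_column_indices_py mask port_size bitorder)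

-- ===== LEMMAS AND PROOFS =====

-- canonical ascending list of set-bit positions (LSB-first linear recursion; proof-only helper)
def pvLittle (m : Nat) : List Nat :=
  if h : m = 0 then []
  else (if m % 2 = 1 then [0] else []) ++ (pvLittle (m / 2)).map (· + 1)
termination_by m
decreasing_by exact Nat.div_lt_self (Nat.pos_of_ne_zero h) one_lt_two

theorem pvLittle_zero : pvLittle 0 = [] := by rw [pvLittle]; rfl

theorem pvLittle_unfold (m : Nat) :
    pvLittle m = (if m % 2 = 1 then [0] else []) ++ (pvLittle (m / 2)).map (· + 1) := by
  by_cases h : m = 0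
  · subst h; rw [pvLittle_zero]; simp [pvLittle_zero]
  · rw [pvLittle]; simp [h]

theorem pvLittle_one : pvLittle 1 = [0] := by
  rw [pvLittle_unfold]
  simp [pvLittle_zero]

theorem pvMapShift (k : Nat) (L : List Nat) :
    (L.map (· + k)).map (· + 1) = L.map (· + (k + 1)) := by
  induction L with
  | nil => rfl
  | cons a t ihl =>
    simp only [List.map_cons, ihl, List.cons.injEq, and_true]
    omega

theorem pvLittle_split (k : Nat) : ∀ lo hi : Nat, lo < 2 ^ k →
    pvLittle (lo + 2 ^ k * hi) = pvLittle lo ++ (pvLittle hi).map (· + k) := by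
  induction k with
  | zero =>
    intro lo hi h
    have h0 : lo = 0 := by omega
    subst h0
    simp [pvLittle_zero]
  | succ k ih =>
    intro lo hi h
    rw [pvLittle_unfold (lo + 2 ^ (k + 1) * hi), pvLittle_unfold lo]
    have hp : lo + 2 ^ (k + 1) * hi = lo + 2 * (2 ^ k * hi) := by rw [pow_succ]; ring
    rw [hp]
    obtain ⟨X, hX⟩ : ∃ X, 2 ^ k * hi = X := ⟨_, rfl⟩
    have h1 : (lo + 2 * X) % 2 = lo % 2 := by omega
    have h2 : (lo + 2 * X) / 2 = lo / 2 + X := by omega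
    have hlo2 : lo / 2 < 2 ^ k := by
      have hpe : 2 ^ (k + 1) = 2 * 2 ^ k := by rw [pow_succ]; ring
      omega
    rw [hX, h1, h2, ← hX, ih (lo / 2) hi hlo2, List.map_append, pvMapShift, List.append_assoc]

theorem pvCastShift (k : Nat) (L : List Nat) :
    (L.map (fun (p : Nat) => (p : Int))).map (fun p => (k : Int) + p) =
      (L.map (· + k)).map (fun (p : Nat) => (p : Int)) := by
  induction L with
  | nil => rfl
  | cons a t ihl =>
    simp only [List.map_cons, ihl, List.cons.injEq, and_true]
    push_cast
    ring

-- fuel suffices: m ≤ fuel → m < 2 ^ pvBitLen fuel m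
theorem pvBitLen_lt : ∀ (fuel m : Nat), m ≤ fuel → m < 2 ^ pvBitLen fuel m := by
  intro fuel
  induction fuel with
  | zero =>
    intro m hm
    have h0 : m = 0 := by omega
    subst h0
    simp [pvBitLen]
  | succ fuel ih =>
    intro m hm
    rcases m with _ | m
    · simp [pvBitLen]
    ·
      have hrec := ih ((m + 1) / 2) (by omega)
      have hp : 2 ^ (pvBitLen fuel ((m + 1) / 2) + 1) = 2 * 2 ^ pvBitLen fuel ((m + 1) / 2) := by
        rw [pow_succ]; ring
      show m + 1 < 2 ^ (pvBitLen fuel ((m + 1) / 2) + 1)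
      omega

theorem pvPositions_eq : ∀ (fuel w m : Nat), w ≤ fuel → m < 2 ^ w →
    pvPositions fuel m w = (pvLittle m).map (fun (p : Nat) => (p : Int)) := by
  intro fuel
  induction fuel with
  | zero =>
    intro w m hw hm
    have h0 : m = 0 := by
      have : (2 : Nat) ^ w = 1 := by
        have hw0 : w = 0 := by omega
        simp [hw0]
      omega
    subst h0
    simp [pvLittle_zero, pvPositions]
  | succ fuel ih =>
    intro w m hw hm
    rcases m with _ | m
    · simp [pvLittle_zero, pvPositions]
    ·
      show (if m + 1 = 0 then [] else if w ≤ 1 then [0] else _) = _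
      rw [if_neg (by omega)]
      by_cases h1 : w ≤ 1
      · rw [if_pos h1]
        have hm1 : m + 1 = 1 := by
          have h2 : 2 ^ w ≤ 2 ^ 1 := Nat.pow_le_pow_right (by omega) h1
          omega
        rw [hm1, pvLittle_one]
        rfl
      · rw [if_neg h1]
        have hk : 0 < w / 2 ∧ w / 2 ≤ fuel ∧ w - w / 2 ≤ fuel := by omega
        have hlo : (m + 1) % 2 ^ (w / 2) < 2 ^ (w / 2) := Nat.mod_lt _ (Nat.two_pow_pos _)
        have hhi : (m + 1) / 2 ^ (w / 2) < 2 ^ (w - w / 2) := by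
          apply Nat.div_lt_of_lt_mul
          calc m + 1 < 2 ^ w := hm
          _ = 2 ^ (w / 2) * 2 ^ (w - w / 2) := by rw [← pow_add]; congr 1; omega
        rw [ih (w / 2) _ hk.2.1 hlo, ih (w - w / 2) _ hk.2.2 hhi]
        have hsplit := pvLittle_split (w / 2) ((m + 1) % 2 ^ (w / 2)) ((m + 1) / 2 ^ (w / 2)) hlo
        rw [Nat.mod_add_div (m + 1) (2 ^ (w / 2))] at hsplit
        rw [hsplit, List.map_append, pvCastShift]

theorem pvLoopShift (ps bit : Int) (bo : String) (L : List Nat) :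
    L.map (fun (p : Nat) =>
        if bo = "big" then ps - 1 - (bit + 1 + (p : Int)) else bit + 1 + (p : Int)) =
      (L.map (· + 1)).map (fun (p : Nat) =>
        if bo = "big" then ps - 1 - (bit + (p : Int)) else bit + (p : Int)) := by
  induction L with
  | nil => rfl
  | cons a t ihl =>
    simp only [List.map_cons, ihl, List.cons.injEq, and_true]
    by_cases hb : bo = "big" <;> simp only [hb, if_true, if_false] <;> push_cast <;> ring

theorem pvLoopA_eq (ps : Int) (bo : String) : ∀ (fuel m : Nat), m ≤ fuel → ∀ (bit : Int) (acc : List Int),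
    pvLoopA ps bo fuel m bit acc =
      acc ++ (pvLittle m).map
        (fun (p : Nat) => if bo = "big" then ps - 1 - (bit + (p : Int)) else bit + (p : Int)) := by
  intro fuel
  induction fuel with
  | zero =>
    intro m hm bit acc
    have h0 : m = 0 := by omega
    subst h0
    simp [pvLoopA, pvLittle_zero]
  | succ fuel ih =>
    intro m hm bit acc
    rcases m with _ | m
    · simp [pvLoopA, pvLittle_zero]
    ·
      show pvLoopA ps bo fuel ((m + 1) / 2) (bit + 1) _ = _
      rw [ih ((m + 1) / 2) (by omega), pvLittle_unfold (m + 1),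
        pvLoopShift ps bit bo (pvLittle ((m + 1) / 2))]
      rcases Nat.mod_two_eq_zero_or_one (m + 1) with h2 | h2
      · simp [h2]
      · simp [h2, List.append_assoc]

theorem pvFinalBig (ps : Int) (L : List Nat) :
    L.map (fun (p : Nat) => ps - 1 - (0 + (p : Int))) =
      (L.map (fun (p : Nat) => (p : Int))).map (fun p => ps - 1 - p) := by
  induction L with
  | nil => rfl
  | cons a t ihl =>
    simp only [List.map_cons, ihl, List.cons.injEq, and_true]
    ring

theorem mask_to_column_indices_py_spec : Claim_equal_mask_to_column_indices_py := by
  intro mask ps bo _ _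
  unfold Spec_mask_to_column_indices_py mask_to_column_indices_py mask_to_column_indices_py_alt
  dsimp only
  rw [pvLoopA_eq ps bo mask.toNat mask.toNat le_rfl,
    pvPositions_eq _ _ _ le_rfl
      (lt_of_lt_of_le (pvBitLen_lt mask.toNat mask.toNat le_rfl)
        (Nat.pow_le_pow_right (by omega) (le_max_left _ _)))]
  by_cases hb : bo = "big"
  · simp only [hb, if_true, List.nil_append]
    rw [← List.map_reverse, ← List.map_reverse, ← pvFinalBig]
  · simp [hb]
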